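-- pv_equiv track=rewrite | github.com/oleksandr-andrushchenko/algos | hacker-rank/data-structures/waiter.py | waiter
-- ===== SOURCE A (Python) =====
-- def generate_primes(q):
--     primes = []
--     num = 2
--     while len(primes) < q:
--         for p in primes:
--             if num % p == 0:
--                 break
--         else:
--             primes.append(num)
--         num += 1
--     return primes
--
-- def waiter(numbers, q):
--     res = []
--     primes = generate_primes(q)
--     for prime in primes:
--         a, b = [], []
--         while numbers:
--             num = numbers.pop()
--             if num % prime == 0:
--                 b.append(num)
--             else:
--                 a.append(num)
--         while b:
--             res.append(b.pop())
--         numbers = a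
--     while numbers:
--         res.append(numbers.pop())
--     return res
-- ===== SOURCE B (Python) =====
-- def generate_primes(q):
--     primes = []
--     num = 2
--     while len(primes) < q:
--         for p in primes:
--             if num % p == 0:
--                 break
--         else:
--             primes.append(num)
--         num += 1
--     return primes
--
-- def waiter(numbers, q):
--     primes = generate_primes(q)
--     n = len(primes)
--     buckets = [[] for _ in range(n + 1)]
--     for x in numbers:
--         idx = n
--         for i, p in enumerate(primes):
--             if x % p == 0:
--                 idx = i
--                 break
--         buckets[idx].append(x)
--     res = []
--     for i in range(n + 1):
--         seg = buckets[i]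
--         if (i < n and i % 2 == 0) or (i == n and n % 2 == 1):
--             res += seg
--         else:
--             res += seg[::-1]
--     return res
-- ===== Notes on version B (the rewrite author's own statement) =====
-- stated objective: alternative
-- what changed: Instead of A's q sequential pop/partition passes that repeatedly reverse the remaining list, B classifies each number by the index of the first prime dividing it and emits the q+1 buckets directly, reversing a bucket exactly when the stack parity of its level demands it.
import Mathlib
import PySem

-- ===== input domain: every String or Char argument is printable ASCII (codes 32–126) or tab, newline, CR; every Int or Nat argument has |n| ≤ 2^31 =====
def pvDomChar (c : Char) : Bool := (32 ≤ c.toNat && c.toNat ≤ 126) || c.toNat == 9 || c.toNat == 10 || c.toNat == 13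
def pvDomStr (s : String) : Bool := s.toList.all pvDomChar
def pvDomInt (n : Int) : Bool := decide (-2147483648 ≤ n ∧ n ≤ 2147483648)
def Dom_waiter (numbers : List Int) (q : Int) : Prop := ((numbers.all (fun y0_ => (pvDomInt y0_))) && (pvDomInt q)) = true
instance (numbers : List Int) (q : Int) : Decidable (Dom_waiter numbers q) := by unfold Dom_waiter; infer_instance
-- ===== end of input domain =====

-- B classifies each number once by its FIRST dividing prime and emits the buckets directly
-- (in the stack-parity order), instead of A's repeated pop/reverse partition passes;
-- objective: alternative. A empties the caller's `numbers` list in place (B does not);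
-- the equivalence proved here is about the return value only.

-- ===== PORT A =====
-- while len(primes) < q: trial-divide num by the primes found so far; the fuel 2^q.toNat
-- only makes the loop total in Lean (the Python loop stops exactly when the guard fails).
def generatePrimesLoop : Nat → List Int → Int → Int → List Int
  | 0, primes, _, _ => primes
  | fuel + 1, primes, num, q =>
    if (primes.length : Int) < q then
      generatePrimesLoop fuel
        (if primes.any (fun p => PySem.Int.mod num p == 0) then primes else primes ++ [num])
        (num + 1) q
    else primes

def generate_primes (q : Int) : List Int := generatePrimesLoop (2 ^ q.toNat) [] 2 q

def waiter (numbers : List Int) (q : Int) : List Int :=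
  let primes := generate_primes q
  let st := primes.foldl
    (fun (st : List Int × List Int) prime =>
      -- while numbers: num = numbers.pop(); put num on b if divisible else on a
      let ab := st.2.reverse.foldl
        (fun (ab : List Int × List Int) num =>
          if PySem.Int.mod num prime == 0 then (ab.1, ab.2 ++ [num]) else (ab.1 ++ [num], ab.2))
        ([], [])
      -- while b: res.append(b.pop());  numbers = a
      (st.1 ++ ab.2.reverse, ab.1))
    ([], numbers)
  -- while numbers: res.append(numbers.pop())
  st.1 ++ st.2.reverse

-- ===== PORT B =====
-- index of the first prime dividing x, or len(primes) if none
def firstPrimeIdx (primes : List Int) (x : Int) : Nat :=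
  match primes.findIdx? (fun p => PySem.Int.mod x p == 0) with
  | some i => i
  | none => primes.length

def waiter_alt (numbers : List Int) (q : Int) : List Int :=
  let primes := generate_primes q
  let n := primes.length
  -- one pass: drop each number into the bucket of its first dividing prime (bucket n = leftover)
  let buckets := numbers.foldl
    (fun (bs : List (List Int)) x => bs.modify (firstPrimeIdx primes x) (fun s => s ++ [x]))
    (List.replicate (n + 1) [])
  -- buckets[i]: the index i < n+1 = len(buckets) is always in range, so plain getD is exact
  (List.range (n + 1)).foldl
    (fun res i =>
      res ++ (if (i < n ∧ i % 2 = 0) ∨ (i = n ∧ n % 2 = 1)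
              then buckets.getD i [] else (buckets.getD i []).reverse))
    []

-- ===== PRECONDITION & SPEC =====
def Spec_waiter (numbers : List Int) (q : Int) (out : List Int) : Prop := out = waiter_alt numbers q
instance (numbers : List Int) (q : Int) (out : List Int) : Decidable (Spec_waiter numbers q out) := by unfold Spec_waiter; infer_instance

-- ===== CLAIM (what is proved, stated in full; the proofs are below) =====
def Claim_equal_waiter : Prop := ∀ (numbers : List Int) (q : Int), Dom_waiter numbers q → Spec_waiter numbers q (waiter numbers q)

-- ===== LEMMAS AND PROOFS =====

-- common intermediate form: A's sequence of partition rounds, written as a recursion on the primes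
def outR : List Int → List Int → List Int
  | [], ns => ns.reverse
  | p :: ps, ns =>
      ns.filter (fun x => PySem.Int.mod x p == 0)
        ++ outR ps ((ns.filter (fun x => !(PySem.Int.mod x p == 0))).reverse)

-- A's inner pop-partition loop is a two-sided filter
theorem part_foldl (P : Int → Bool) (xs : List Int) :
    ∀ a b : List Int,
      xs.foldl
        (fun (ab : List Int × List Int) num =>
          if P num then (ab.1, ab.2 ++ [num]) else (ab.1 ++ [num], ab.2)) (a, b)
      = (a ++ xs.filter (fun x => !(P x)), b ++ xs.filter P) := by
  induction xs with
  | nil => simp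
  | cons x xs ih =>
    intro a b
    by_cases h : P x = true <;> simp [h, ih]

theorem foldA (primes : List Int) :
    ∀ res ns : List Int,
      (primes.foldl
        (fun (st : List Int × List Int) prime =>
          (st.1 ++ (st.2.reverse.foldl
            (fun (ab : List Int × List Int) num =>
              if PySem.Int.mod num prime == 0 then (ab.1, ab.2 ++ [num]) else (ab.1 ++ [num], ab.2))
            ([], [])).2.reverse,
           (st.2.reverse.foldl
            (fun (ab : List Int × List Int) num =>
              if PySem.Int.mod num prime == 0 then (ab.1, ab.2 ++ [num]) else (ab.1 ++ [num], ab.2))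
            ([], [])).1)) (res, ns)).1
      ++ (primes.foldl
        (fun (st : List Int × List Int) prime =>
          (st.1 ++ (st.2.reverse.foldl
            (fun (ab : List Int × List Int) num =>
              if PySem.Int.mod num prime == 0 then (ab.1, ab.2 ++ [num]) else (ab.1 ++ [num], ab.2))
            ([], [])).2.reverse,
           (st.2.reverse.foldl
            (fun (ab : List Int × List Int) num =>
              if PySem.Int.mod num prime == 0 then (ab.1, ab.2 ++ [num]) else (ab.1 ++ [num], ab.2))
            ([], [])).1)) (res, ns)).2.reverse
      = res ++ outR primes ns := by
  induction primes with
  | nil => intro res ns; simp [outR]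
  | cons p ps ih =>
    intro res ns
    simp only [List.foldl_cons]
    rw [part_foldl]
    rw [List.nil_append, List.nil_append, List.filter_reverse, List.filter_reverse,
      List.reverse_reverse]
    rw [ih]
    simp [outR]

theorem waiter_eq_outR (numbers : List Int) (q : Int) :
    waiter numbers q = outR (generate_primes q) numbers := by
  simpa only [waiter] using foldA (generate_primes q) [] numbers

theorem firstIdx_cons (p : Int) (ps : List Int) (x : Int) :
    firstPrimeIdx (p :: ps) x
      = if PySem.Int.mod x p == 0 then 0 else firstPrimeIdx ps x + 1 := by
  simp only [firstPrimeIdx, List.findIdx?_cons]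
  by_cases h : (PySem.Int.mod x p == 0) = true
  · simp [h]
  · simp only [h, if_false, Bool.false_eq_true]
    cases hfi : ps.findIdx? (fun p => PySem.Int.mod x p == 0) <;> simp

-- append-accumulating fold over an index list is a flatMap
theorem foldl_append_flatMap (l : List Nat) (f : Nat → List Int) :
    ∀ init : List Int, l.foldl (fun res i => res ++ f i) init = init ++ l.flatMap f := by
  induction l with
  | nil => simp
  | cons x xs ih => intro init; simp [ih]

theorem flatMap_congr' {α β : Type} (l : List α) (f g : α → List β)
    (h : ∀ a ∈ l, f a = g a) : l.flatMap f = l.flatMap g := by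
  induction l with
  | nil => simp
  | cons x xs ih =>
    simp only [List.flatMap_cons]
    rw [h x (by simp), ih (fun a ha => h a (by simp [ha]))]

theorem buckets_getElem? (key : Int → Nat) (xs : List Int) :
    ∀ (bs : List (List Int)) (i : Nat),
      (xs.foldl (fun bs x => bs.modify (key x) (fun s => s ++ [x])) bs)[i]?
        = Option.map (fun s => s ++ xs.filter (fun x => key x == i)) bs[i]? := by
  induction xs with
  | nil => intro bs i; cases h : bs[i]? <;> simp [h]
  | cons x xs ih =>
    intro bs i
    rw [List.foldl_cons, ih, List.getElem?_modify]
    by_cases h : key x = i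
    · cases bs[i]? <;> simp [h]
    · cases bs[i]? <;> simp [h]

theorem emitFilter_eq_outR (primes : List Int) :
    ∀ ns : List Int,
      (List.range (primes.length + 1)).flatMap
        (fun i =>
          if (i < primes.length ∧ i % 2 = 0) ∨ (i = primes.length ∧ primes.length % 2 = 1)
          then ns.filter (fun x => firstPrimeIdx primes x == i)
          else (ns.filter (fun x => firstPrimeIdx primes x == i)).reverse)
      = outR primes ns := by
  induction primes with
  | nil =>
    intro ns
    simp [outR, firstPrimeIdx]
  | cons p ps ih =>
    intro ns
    rw [List.range_succ_eq_map, List.flatMap_cons, List.flatMap_map]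
    simp only [List.length_cons, Nat.succ_eq_add_one]
    have seg0 : ns.filter (fun x => firstPrimeIdx (p :: ps) x == 0)
        = ns.filter (fun x => PySem.Int.mod x p == 0) := by
      apply List.filter_congr
      intro x _
      rw [firstIdx_cons]
      by_cases h : (PySem.Int.mod x p == 0) = true <;> simp [h]
    have cond0 : ((0 < ps.length + 1 ∧ True) ∨
        (0 = ps.length + 1 ∧ (ps.length + 1) % 2 = 1)) := by
      left; exact ⟨Nat.succ_pos _, trivial⟩
    have tail : ∀ i ∈ List.range (ps.length + 1),
        (if (i + 1 < ps.length + 1 ∧ (i + 1) % 2 = 0) ∨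
            (i + 1 = ps.length + 1 ∧ (ps.length + 1) % 2 = 1)
         then ns.filter (fun x => firstPrimeIdx (p :: ps) x == i + 1)
         else (ns.filter (fun x => firstPrimeIdx (p :: ps) x == i + 1)).reverse)
        = (if (i < ps.length ∧ i % 2 = 0) ∨ (i = ps.length ∧ ps.length % 2 = 1)
           then ((ns.filter (fun x => !(PySem.Int.mod x p == 0))).reverse).filter
                  (fun x => firstPrimeIdx ps x == i)
           else (((ns.filter (fun x => !(PySem.Int.mod x p == 0))).reverse).filter
                  (fun x => firstPrimeIdx ps x == i)).reverse) := by
      intro i hi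
      rw [List.mem_range] at hi
      have hseg : ns.filter (fun x => firstPrimeIdx (p :: ps) x == (i + 1))
          = (ns.filter (fun x => !(PySem.Int.mod x p == 0))).filter
              (fun x => firstPrimeIdx ps x == i) := by
        rw [List.filter_filter]
        apply List.filter_congr
        intro x _
        rw [firstIdx_cons]
        by_cases h : (PySem.Int.mod x p == 0) = true <;> simp [h]
      have hcond : (((i + 1 < ps.length + 1 ∧ (i + 1) % 2 = 0) ∨
            (i + 1 = ps.length + 1 ∧ (ps.length + 1) % 2 = 1)))
          ↔ ¬ ((i < ps.length ∧ i % 2 = 0) ∨ (i = ps.length ∧ ps.length % 2 = 1)) := by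
        omega
      simp only [List.filter_reverse, hseg]
      by_cases hc : (i < ps.length ∧ i % 2 = 0) ∨ (i = ps.length ∧ ps.length % 2 = 1)
      · rw [if_pos hc, if_neg (by rw [hcond]; exact not_not_intro hc)]
      · rw [if_neg hc, if_pos (hcond.mpr hc), List.reverse_reverse]
    have htail := flatMap_congr' (List.range (ps.length + 1))
      (fun a => if (a + 1 < ps.length + 1 ∧ (a + 1) % 2 = 0) ∨
            (a + 1 = ps.length + 1 ∧ (ps.length + 1) % 2 = 1)
         then ns.filter (fun x => firstPrimeIdx (p :: ps) x == a + 1)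
         else (ns.filter (fun x => firstPrimeIdx (p :: ps) x == a + 1)).reverse)
      (fun i => if (i < ps.length ∧ i % 2 = 0) ∨ (i = ps.length ∧ ps.length % 2 = 1)
         then ((ns.filter (fun x => !(PySem.Int.mod x p == 0))).reverse).filter
                (fun x => firstPrimeIdx ps x == i)
         else (((ns.filter (fun x => !(PySem.Int.mod x p == 0))).reverse).filter
                (fun x => firstPrimeIdx ps x == i)).reverse)
      tail
    rw [htail, ih ((ns.filter (fun x => !(PySem.Int.mod x p == 0))).reverse),
      if_pos cond0, seg0]
    rfl

theorem waiter_alt_eq_outR (numbers : List Int) (q : Int) :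
    waiter_alt numbers q = outR (generate_primes q) numbers := by
  simp only [waiter_alt]
  rw [foldl_append_flatMap, List.nil_append]
  rw [flatMap_congr' (List.range ((generate_primes q).length + 1))
      (fun i =>
        if (i < (generate_primes q).length ∧ i % 2 = 0) ∨
            (i = (generate_primes q).length ∧ (generate_primes q).length % 2 = 1)
        then (numbers.foldl
          (fun (bs : List (List Int)) x =>
            bs.modify (firstPrimeIdx (generate_primes q) x) (fun s => s ++ [x]))
          (List.replicate ((generate_primes q).length + 1) [])).getD i []
        else ((numbers.foldl
          (fun (bs : List (List Int)) x =>
            bs.modify (firstPrimeIdx (generate_primes q) x) (fun s => s ++ [x]))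
          (List.replicate ((generate_primes q).length + 1) [])).getD i []).reverse)
      (fun i =>
        if (i < (generate_primes q).length ∧ i % 2 = 0) ∨
            (i = (generate_primes q).length ∧ (generate_primes q).length % 2 = 1)
        then numbers.filter (fun x => firstPrimeIdx (generate_primes q) x == i)
        else (numbers.filter (fun x => firstPrimeIdx (generate_primes q) x == i)).reverse)
      (by
        intro i hi
        rw [List.mem_range] at hi
        have hbk : (numbers.foldl
            (fun (bs : List (List Int)) x =>
              bs.modify (firstPrimeIdx (generate_primes q) x) (fun s => s ++ [x]))
            (List.replicate ((generate_primes q).length + 1) [])).getD i []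
            = numbers.filter (fun x => firstPrimeIdx (generate_primes q) x == i) := by
          rw [List.getD_eq_getElem?_getD, buckets_getElem?, List.getElem?_replicate,
            if_pos hi]
          rfl
        simp only [hbk])]
  exact emitFilter_eq_outR (generate_primes q) numbers

-- ===== VERDICT (by name: the statement is the Claim_ definition above) =====
theorem waiter_spec : Claim_equal_waiter := by
  intro numbers q _
  unfold Spec_waiter
  rw [waiter_eq_outR, waiter_alt_eq_outR]
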